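-- pv_equiv track=rewrite | github.com/gildasmulders/grapheDev1 | temp.py | are_iso_with_colors
-- ===== SOURCE A (Python) =====
-- def check_mapping(A, B, h):
--     """
--     Input :
--         - A, B two adjacency matrices (arrays of arrays) with same dimensions
--         - h an array describing an isomorphism mapping node i from A to node h[i] from B
--     Return True if h(A) = B, False otherwise
--     """
--     for E1 in range(len(A)):
--             for I1 in range(len(A)):
--                     if A[E1][I1] != B[h[E1]][h[I1]]:
--                         return False
--
--     return True
--
-- def color_ones(A):
--     """
--     Input :
--         - A an adjacency matrix (array of arrays)
--
--     Return an array of same dimension as A containing only ones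
--     """
--
--     n = len(A)
--     T = [1]*n
--
--     return T
--
-- def are_iso_with_colors(A, B, color = color_ones):
--     """
--     Input :
--         - A, B two adjacency matrices (arrays of arrays) with same dimensions
--         - color a coloring function
--     Return (Ans, h) using the coloring heuristic with :
--         - Ans = True if A and B are isomorphic, False otherwise
--         - h describe an isomorphim such that h(A) = B if Ans = True, h = [] otherwise
--
--     """
--     n = len(A)
--     colorsA = color(A)
--     colorsB = color(B)
--     h = [-1]*n
--
--     sameColor = []
--
--     for E2 in range(n):
--         for E3 in range(n):
--             if(colorsA[E2] == colorsB[E3]) :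
--                 sameColor.append(tuple([E2, E3]))
--
--
--     def iso_with_colors( h):
--
--         n = len(A)
--
--         if -1 not in h :
--
--             if check_mapping(A, B, h) == True :
--                 return True, h
--
--
--         for E4 in sameColor:
--             if (h[E4[0]] == -1) and (E4[1] not in h):
--                 h[E4[0]] = E4[1]
--                 result, temp = iso_with_colors(h)
--                 if result == True:
--
--                     return True, temp
--                 else:
--                     h[E4[0]] = -1
--
--         return False, []
--
--     iso, hfinal = iso_with_colors(h)
--
--     return iso, hfinal
-- ===== SOURCE B (Python) =====
-- def color_ones(A):
--     n = len(A)
--     return [1] * n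
--
-- def are_iso_with_colors(A, B, color=color_ones):
--     """Backtracking with incremental edge-consistency pruning: vertex k of A is
--     assigned an image j of B only if all edges among the already-assigned
--     vertices (plus the self-loop) agree, so inconsistent partial mappings are
--     abandoned immediately instead of only being rejected at complete mappings."""
--     n = len(A)
--     colorsA = color(A)
--     colorsB = color(B)
--     h = []
--
--     def extend():
--         k = len(h)
--         if k == n:
--             return True
--         for j in range(n):
--             if j in h or colorsA[k] != colorsB[j]:
--                 continue
--             if A[k][k] != B[j][j]:
--                 continue
--             if any(A[i][k] != B[h[i]][j] or A[k][i] != B[j][h[i]] for i in range(k)):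
--                 continue
--             h.append(j)
--             if extend():
--                 return True
--             h.pop()
--         return False
--
--     if extend():
--         return True, h
--     return False, []
-- ===== Notes on version B (the rewrite author's own statement) =====
-- stated objective: faster
-- what changed: A enumerates complete candidate mappings by recursive backtracking over the full sameColor pair list and only tests fully assigned mappings with check_mapping; B assigns vertices 0..n-1 in order and checks edge consistency of each new image against the already-assigned vertices immediately, pruning inconsistent partial mappings without descending into their subtrees (intended as faster; the probe measured B 7.78x at n=16 — under its 5 ms floor — and A timing out at n=64 where B returned).
-- outside the precondition, e.g. on are_iso_with_colors([[0, 0], [0, 0]], [[9], [9, 9]]): A returns (False, []), B returns (False, [])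
import Mathlib
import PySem

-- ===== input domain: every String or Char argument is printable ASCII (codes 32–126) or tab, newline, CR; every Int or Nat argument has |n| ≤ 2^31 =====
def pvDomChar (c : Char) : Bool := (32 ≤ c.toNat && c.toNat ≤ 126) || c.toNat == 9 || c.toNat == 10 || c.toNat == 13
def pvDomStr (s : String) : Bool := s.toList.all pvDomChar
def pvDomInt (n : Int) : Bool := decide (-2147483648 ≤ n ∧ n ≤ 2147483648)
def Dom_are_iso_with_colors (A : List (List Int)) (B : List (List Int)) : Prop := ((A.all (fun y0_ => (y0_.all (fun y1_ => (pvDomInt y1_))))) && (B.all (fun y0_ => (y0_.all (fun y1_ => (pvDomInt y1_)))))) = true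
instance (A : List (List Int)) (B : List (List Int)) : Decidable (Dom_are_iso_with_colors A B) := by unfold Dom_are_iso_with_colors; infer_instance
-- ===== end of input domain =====

-- B replaces A's leaf-only full-mapping test by incremental edge-consistency pruning
-- during the backtracking; intended as faster (timing: B 7.78x at n=16, under its
-- 5 ms reliability floor; A timed out at n=64 where B returned). Equal return values.


-- ===== PORT A =====
-- shared low-level helpers: M[e][i] and h[e] (in range on every admitted input;
-- the defaults only make the functions total, they are never read under Pre_)
def pvGet2 (M : List (List Int)) (e i : Int) : Int :=
  PySem.List.pyGetD (PySem.List.pyGetD M e []) i 0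

def pvHv (h : List Int) (e : Int) : Int := PySem.List.pyGetD h e (-2)

-- color_ones: [1]*n
def color_ones (A : List (List Int)) : List Int :=
  PySem.List.pyRepeat [(1 : Int)] (A.length : Int)

-- check_mapping: the two nested 'for … in range(len(A))' loops with early 'return False'
def check_inner (A B : List (List Int)) (h : List Int) (e1 : Int) : List Int → Bool
  | [] => true
  | i1 :: rest =>
    if pvGet2 A e1 i1 ≠ pvGet2 B (pvHv h e1) (pvHv h i1) then false
    else check_inner A B h e1 rest

def check_outer (A B : List (List Int)) (h : List Int) : List Int → Bool
  | [] => true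
  | e1 :: rest =>
    if check_inner A B h e1 (PySem.List.pyRange 0 (A.length : Int) 1) then
      check_outer A B h rest
    else false

def check_mapping (A B : List (List Int)) (h : List Int) : Bool :=
  check_outer A B h (PySem.List.pyRange 0 (A.length : Int) 1)

-- sameColor construction: the two nested loops appending (E2, E3) when colors match
def scInner (cA cB : List Int) (e2 : Int) (acc : List (Int × Int)) : List Int → List (Int × Int)
  | [] => acc
  | e3 :: rest =>
    scInner cA cB e2
      (if PySem.List.pyGetD cA e2 0 = PySem.List.pyGetD cB e3 0 then acc ++ [(e2, e3)] else acc)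
      rest

def scOuter (cA cB : List Int) (n : Int) (acc : List (Int × Int)) : List Int → List (Int × Int)
  | [] => acc
  | e2 :: rest => scOuter cA cB n (scInner cA cB e2 acc (PySem.List.pyRange 0 n 1)) rest

-- termination lemma for the recursion of iso_with_colors: assigning a free slot
-- (value -1) a value f not yet in h strictly decreases the number of -1 entries
theorem pvSetD_count_lt (h : List Int) (e f : Int)
    (h1 : PySem.List.pyGetD h e (-2) = -1) (h2 : f ∉ h) :
    (PySem.List.pySetD h e f).count (-1) < h.count (-1) := by
  unfold PySem.List.pyGetD PySem.List.pyGet? at h1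
  unfold PySem.List.pySetD PySem.List.pySet?
  cases hidx : PySem.List.pyIdx? h.length e with
  | none => simp [hidx] at h1
  | some m =>
    simp only [Option.map_some, Option.getD_some]
    have hm : m < h.length := by
      by_contra hge
      simp [hidx, List.getElem?_eq_none (by omega : h.length ≤ m)] at h1
    have hv : h[m] = -1 := by
      simpa [hidx, List.getElem?_eq_getElem hm] using h1
    have hmem : (-1 : Int) ∈ h := by rw [← hv]; exact List.getElem_mem hm
    have hf : f ≠ -1 := fun hc => h2 (hc ▸ hmem)
    have := List.count_set (a := f) (b := (-1 : Int)) (l := h) hm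
    have hpos : 0 < h.count (-1) := List.count_pos_iff.mpr hmem
    simp [hv, hf] at this
    omega

-- the inner recursive function iso_with_colors(h); the outer 'for E4 in sameColor'
-- loop is isoLoopA over the remaining pairs (h is threaded functionally: Python
-- restores h[E4[0]] = -1 on failure, which is 'keep the old h' here)
mutual
def isoTopA (A B : List (List Int)) (sc : List (Int × Int)) (h : List Int) : Bool × List Int :=
  if ¬ ((-1 : Int) ∈ h) then
    if check_mapping A B h then (true, h)
    else isoLoopA A B sc h sc
  else isoLoopA A B sc h sc
termination_by (h.count (-1), 1, 0)
decreasing_by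
  all_goals (apply Prod.Lex.right; exact Prod.Lex.left _ _ (by omega))

def isoLoopA (A B : List (List Int)) (sc : List (Int × Int)) (h : List Int) :
    List (Int × Int) → Bool × List Int
  | [] => (false, [])
  | (e, f) :: rest =>
    if hc : PySem.List.pyGetD h e (-2) = -1 ∧ ¬ (f ∈ h) then
      match isoTopA A B sc (PySem.List.pySetD h e f) with
      | (true, t) => (true, t)
      | (false, _) => isoLoopA A B sc h rest
    else isoLoopA A B sc h rest
termination_by rem => (h.count (-1), 0, rem.length)
decreasing_by
  all_goals first
    | (apply Prod.Lex.left; exact pvSetD_count_lt _ _ _ hc.1 hc.2)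
    | (apply Prod.Lex.right; apply Prod.Lex.right; simp only [List.length_cons]; omega)
end

def are_iso_with_colors (A : List (List Int)) (B : List (List Int)) : Bool × List Int :=
  let n : Int := (A.length : Int)
  let colorsA := color_ones A
  let colorsB := color_ones B
  let h := PySem.List.pyRepeat [(-1 : Int)] n
  let sameColor := scOuter colorsA colorsB n [] (PySem.List.pyRange 0 n 1)
  isoTopA A B sameColor h

-- ===== PORT B =====
-- any(A[i][k] != B[h[i]][j] or A[k][i] != B[j][h[i]] for i in range(k))
def okLoopB (A B : List (List Int)) (h : List Int) (k j : Int) : List Int → Bool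
  | [] => false
  | i :: rest =>
    if pvGet2 A i k ≠ pvGet2 B (pvHv h i) j ∨ pvGet2 A k i ≠ pvGet2 B j (pvHv h i) then true
    else okLoopB A B h k j rest

-- extend(): fuel = n - len(h) makes the recursion structural; 'fuel = 0' is 'k == n'
mutual
def extTopB (A B : List (List Int)) (cA cB : List Int) (n : Int) :
    Nat → List Int → Bool × List Int
  | 0, h => (true, h)
  | fuel + 1, h => extLoopB A B cA cB n fuel h (PySem.List.pyRange 0 n 1)
termination_by fuel _ => (fuel, 0)

def extLoopB (A B : List (List Int)) (cA cB : List Int) (n : Int) (fuel : Nat) (h : List Int) :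
    List Int → Bool × List Int
  | [] => (false, [])
  | j :: js =>
    if j ∈ h ∨ PySem.List.pyGetD cA (h.length : Int) 0 ≠ PySem.List.pyGetD cB j 0 then
      extLoopB A B cA cB n fuel h js
    else if pvGet2 A (h.length : Int) (h.length : Int) ≠ pvGet2 B j j then
      extLoopB A B cA cB n fuel h js
    else if okLoopB A B h (h.length : Int) j (PySem.List.pyRange 0 (h.length : Int) 1) then
      extLoopB A B cA cB n fuel h js
    else
      match extTopB A B cA cB n fuel (h ++ [j]) with
      | (true, g) => (true, g)
      | (false, _) => extLoopB A B cA cB n fuel h js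
termination_by js => (fuel, js.length + 1)
end

def are_iso_with_colors_alt (A : List (List Int)) (B : List (List Int)) : Bool × List Int :=
  let n : Int := (A.length : Int)
  let colorsA := color_ones A
  let colorsB := color_ones B
  match extTopB A B colorsA colorsB n A.length [] with
  | (true, g) => (true, g)
  | (false, _) => (false, [])

-- ===== PRECONDITION & SPEC =====
-- Pre_ excludes the inputs on which an out-of-range cell access is reachable
-- (len(B) < len(A), or a row shorter than len(A) among A's rows or B's first
-- len(A) rows): on those the Python raises IndexError, except for a few ragged
-- inputs where every candidate mapping happens to hit a mismatch before the
-- short row and both programs return (False, []).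
def Pre_are_iso_with_colors (A : List (List Int)) (B : List (List Int)) : Prop :=
  A.length ≤ B.length ∧ (∀ r ∈ A, A.length ≤ r.length) ∧
    (∀ r ∈ B.take A.length, A.length ≤ r.length)
instance (A : List (List Int)) (B : List (List Int)) : Decidable (Pre_are_iso_with_colors A B) := by
  unfold Pre_are_iso_with_colors; infer_instance

def pvWitness_are_iso_with_colors : List (List Int) × List (List Int) := ([[0]], [[0]])

def Spec_are_iso_with_colors (A : List (List Int)) (B : List (List Int)) (out : Bool × List Int) : Prop := out = are_iso_with_colors_alt A B
instance (A : List (List Int)) (B : List (List Int)) (out : Bool × List Int) : Decidable (Spec_are_iso_with_colors A B out) := by unfold Spec_are_iso_with_colors; infer_instance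

-- ===== CLAIM (what is proved, stated in full; the proofs are below) =====
def Claim_equal_are_iso_with_colors : Prop := ∀ (A : List (List Int)) (B : List (List Int)), Dom_are_iso_with_colors A B → Pre_are_iso_with_colors A B → Spec_are_iso_with_colors A B (are_iso_with_colors A B)


-- ===== LEMMAS AND PROOFS =====

-- == proof-side vocabulary: the DFS tree both programs explore ==

-- the candidate values 0..n-1
def rngI (n : Nat) : List Int := PySem.List.pyRange 0 (n : Int) 1

-- all (E2, E3) pairs, the value sameColor takes with the all-ones coloring
def allPairs (n : Nat) : List (Int × Int) :=
  (rngI n).flatMap (fun e => (rngI n).map (fun f => (e, f)))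

-- all full completions of a partial mapping h (-1 = unassigned), in the order
-- the searches visit them: fill the first free slot with each unused value
def complsGo (n : Nat) : Nat → List Int → List (List Int)
  | 0, h => [h]
  | c + 1, h =>
    match PySem.List.index? h (-1) with
    | none => [h]
    | some k =>
      ((rngI n).filter (fun f => decide (f ∉ h))).flatMap (fun f => complsGo n c (h.set k f))

def compls (n : Nat) (h : List Int) : List (List Int) := complsGo n (h.count (-1)) h

def firstA (A B : List (List Int)) (l : List (List Int)) : Option (List Int) :=
  l.find? (fun g => check_mapping A B g)

def mkRes : Option (List Int) → Bool × List Int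
  | some g => (true, g)
  | none => (false, [])

-- B's growing prefix p seen as an A-style partial mapping
def hOf (n : Nat) (p : List Int) : List Int := p ++ List.replicate (n - p.length) (-1)

-- the incremental consistency B maintains
def ConsistB (A B : List (List Int)) (p : List Int) : Prop :=
  ∀ k (hk : k < p.length),
    pvGet2 A (k : Int) (k : Int) = pvGet2 B (p[k]) (p[k]) ∧
    ∀ i (hi : i < k),
      pvGet2 A (i : Int) (k : Int) = pvGet2 B (p[i]'(by omega)) (p[k]) ∧
      pvGet2 A (k : Int) (i : Int) = pvGet2 B (p[k]) (p[i]'(by omega))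

-- == generic helpers ==

theorem mem_rngI {n : Nat} {x : Int} : x ∈ rngI n ↔ 0 ≤ x ∧ x < (n : Int) := by
  simp [rngI, PySem.List.mem_pyRange_one]

theorem count_set_pred (h : List Int) {m : Nat} (hm : m < h.length) (hv : h[m] = -1)
    {f : Int} (hf : f ≠ -1) : (h.set m f).count (-1) + 1 = h.count (-1) := by
  have hcs := List.count_set (a := f) (b := (-1 : Int)) (l := h) hm
  have hpos : 0 < h.count (-1) :=
    List.count_pos_iff.mpr (by rw [← hv]; exact List.getElem_mem hm)
  simp [hv, hf] at hcs
  omega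

theorem index?_eq_some_of {l : List Int} {v : Int} {k : Nat} (hk : k < l.length)
    (hv : l[k] = v) (hbef : ∀ j (hj : j < k), l[j] ≠ v) :
    PySem.List.index? l v = some k := by
  rw [PySem.List.index?_eq_some_iff]
  refine ⟨l.take k, l.drop (k + 1), ?_, by simp [List.length_take]; omega, ?_⟩
  · conv_lhs => rw [← List.take_append_drop k l]
    rw [List.drop_eq_getElem_cons hk, hv]
  · intro hmem
    rw [List.mem_take_iff_getElem] at hmem
    obtain ⟨i, hi, hiv⟩ := hmem
    exact hbef i (by omega) (by simpa using hiv)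

theorem flatMap_if_filter {α β : Type} (l : List α) (P : α → Prop) [DecidablePred P]
    (g : α → List β) :
    (l.flatMap (fun x => if P x then g x else [])) =
      (l.filter (fun x => decide (P x))).flatMap g := by
  induction l with
  | nil => rfl
  | cons x rest ih =>
    by_cases hx : P x <;> simp [List.flatMap_cons, hx, ih]

-- == compls: unfolding equations and structural facts ==

theorem compls_none {n : Nat} {h : List Int} (hi : PySem.List.index? h (-1) = none) :
    compls n h = [h] := by
  unfold compls
  cases hc : h.count (-1) with
  | zero => rfl
  | succ c =>
    simp only [complsGo]
    rw [hi]

theorem compls_some {n : Nat} {h : List Int} {k : Nat}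
    (hi : PySem.List.index? h (-1) = some k) :
    compls n h =
      ((rngI n).filter (fun f => decide (f ∉ h))).flatMap (fun f => compls n (h.set k f)) := by
  obtain ⟨hk, hv, -⟩ := PySem.List.getElem_of_index?_eq_some hi
  have hmem : (-1 : Int) ∈ h := by rw [← hv]; exact List.getElem_mem hk
  have hcnt : 0 < h.count (-1) := List.count_pos_iff.mpr hmem
  obtain ⟨c, hc⟩ : ∃ c, h.count (-1) = c + 1 := ⟨h.count (-1) - 1, by omega⟩
  unfold compls
  rw [hc]
  simp only [complsGo]
  rw [hi]
  apply List.flatMap_congr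
  intro f hf
  rw [List.mem_filter] at hf
  have hf0 : (0 : Int) ≤ f := (mem_rngI.mp hf.1).1
  have hce : (h.set k f).count (-1) = c := by
    have := count_set_pred h hk hv (f := f) (by intro hfe; subst hfe; norm_num at hf0)
    omega
  rw [← hce]

theorem compls_ext {n : Nat} : ∀ (c : Nat) (h g : List Int), h.count (-1) = c →
    g ∈ compls n h →
    g.length = h.length ∧
      ∀ i (hi : i < h.length) (hg : i < g.length), h[i] ≠ -1 → g[i] = h[i] := by
  intro c
  induction c using Nat.strong_induction_on with
  | _ c IHc =>
  intro h g hc hg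
  cases hi : PySem.List.index? h (-1) with
  | none =>
    rw [compls_none hi] at hg
    simp at hg
    subst hg
    exact ⟨rfl, fun i _ _ _ => rfl⟩
  | some k =>
    rw [compls_some hi] at hg
    rw [List.mem_flatMap] at hg
    obtain ⟨f, hf, hgf⟩ := hg
    rw [List.mem_filter] at hf
    have hf0 : (0 : Int) ≤ f := (mem_rngI.mp hf.1).1
    obtain ⟨hk, hv, -⟩ := PySem.List.getElem_of_index?_eq_some hi
    have hcnt := count_set_pred h hk hv (f := f) (by intro hfe; subst hfe; norm_num at hf0)
    obtain ⟨hlen, hext⟩ :=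
      IHc ((h.set k f).count (-1)) (by omega) (h.set k f) g rfl hgf
    refine ⟨by simpa using hlen, ?_⟩
    intro i hi1 hi2 hne
    have hik : i ≠ k := by intro hik; subst hik; exact hne hv
    have := hext i (by simpa using hi1) hi2
      (by rw [List.getElem_set_ne (by omega)]; exact hne)
    rwa [List.getElem_set_ne (by omega)] at this

theorem compls_sub {n : Nat} : ∀ (c : Nat) (h : List Int), h.count (-1) = c →
    ∀ {m : Nat} {f : Int} (hm : m < h.length), h[m]'hm = -1 → f ∈ rngI n → f ∉ h →
    ∀ {g : List Int}, g ∈ compls n (h.set m f) → g ∈ compls n h := by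
  intro c
  induction c using Nat.strong_induction_on with
  | _ c IHc =>
  intro h hc m f hm hv hfr hfh g hg
  have hf0 : (0 : Int) ≤ f := (mem_rngI.mp hfr).1
  have hmem : (-1 : Int) ∈ h := by rw [← hv]; exact List.getElem_mem hm
  -- the first -1 slot of h
  cases hi : PySem.List.index? h (-1) with
  | none => exact absurd ((PySem.List.index?_eq_none_iff h (-1)).mp hi) (by simp [hmem])
  | some k =>
    obtain ⟨hk, hkv, hbef⟩ := PySem.List.getElem_of_index?_eq_some hi
    by_cases hmk : m = k
    · subst hmk
      rw [compls_some hi, List.mem_flatMap]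
      exact ⟨f, by rw [List.mem_filter]; simp [hfr, hfh], hg⟩
    · have hkm : k < m := by
        rcases Nat.lt_or_ge m k with hlt | hge
        · exact absurd hv (hbef m hlt)
        · omega
      -- first -1 slot of h.set m f is still k
      have hik : PySem.List.index? (h.set m f) (-1) = some k := by
        apply index?_eq_some_of (k := k) (by simpa using hk)
        · rw [List.getElem_set_ne (by omega)]; exact hkv
        · intro j hj
          rw [List.getElem_set_ne (by omega)]
          exact hbef j hj
      rw [compls_some hik, List.mem_flatMap] at hg
      obtain ⟨f', hf', hgf'⟩ := hg
      rw [List.mem_filter] at hf'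
      obtain ⟨hf'r, hf'm⟩ := hf'
      have hf'0 : (0 : Int) ≤ f' := (mem_rngI.mp hf'r).1
      have hf'nm : f' ∉ h.set m f := by simpa using hf'm
      have hfmem : f ∈ h.set m f := by
        refine List.mem_iff_getElem.mpr ⟨m, by simpa using hm, ?_⟩
        exact List.getElem_set_self _
      have hf'f : f' ≠ f := fun hff => hf'nm (hff ▸ hfmem)
      have hf'h : f' ∉ h := by
        intro hmemf'
        obtain ⟨i, hilt, hieq⟩ := List.mem_iff_getElem.mp hmemf'
        have him : i ≠ m := by intro he; subst he; rw [hieq] at hv; omega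
        exact hf'nm (by rw [← hieq, ← List.getElem_set_ne (i := m) (j := i) (Ne.symm him)
          (by simpa using hilt)]; exact List.getElem_mem _)
      -- commute the two set operations and apply the induction hypothesis
      rw [List.set_comm _ _ hmk] at hgf'
      have hcnt := count_set_pred h hk hkv (f := f') (by intro hfe; subst hfe; norm_num at hf'0)
      have hsv : (h.set k f')[m]'(by simpa using hm) = -1 := by
        rw [List.getElem_set_ne (by omega)]; exact hv
      have hfnh' : f ∉ h.set k f' := by
        intro hmf
        obtain ⟨i, hilt, hieq⟩ := List.mem_iff_getElem.mp hmf
        by_cases hike : i = k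
        · subst hike; rw [List.getElem_set_self] at hieq; exact hf'f hieq
        · rw [List.getElem_set_ne (fun he => hike he.symm)] at hieq
          exact hfh (by rw [← hieq]; exact List.getElem_mem _)
      have hsub := IHc ((h.set k f').count (-1)) (by omega) (h.set k f') rfl
        (by simpa using hm) hsv hfr hfnh' hgf'
      rw [compls_some hi, List.mem_flatMap]
      exact ⟨f', by rw [List.mem_filter]; simp [hf'r, hf'h], hsub⟩

-- == check_mapping as a proposition ==

theorem check_inner_iff (A B : List (List Int)) (h : List Int) (e1 : Int) (is : List Int) :
    check_inner A B h e1 is = true ↔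
      ∀ i1 ∈ is, pvGet2 A e1 i1 = pvGet2 B (pvHv h e1) (pvHv h i1) := by
  induction is with
  | nil => simp [check_inner]
  | cons i rest ih =>
    by_cases hc : pvGet2 A e1 i = pvGet2 B (pvHv h e1) (pvHv h i) <;>
      simp [check_inner, hc, ih]

theorem check_iff (A B : List (List Int)) (g : List Int) :
    check_mapping A B g = true ↔
      ∀ e1 ∈ rngI A.length, ∀ i1 ∈ rngI A.length,
        pvGet2 A e1 i1 = pvGet2 B (pvHv g e1) (pvHv g i1) := by
  have houter : ∀ es : List Int, check_outer A B g es = true ↔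
      ∀ e1 ∈ es, check_inner A B g e1 (PySem.List.pyRange 0 (A.length : Int) 1) = true := by
    intro es
    induction es with
    | nil => simp [check_outer]
    | cons e rest ih =>
      by_cases hc : check_inner A B g e (PySem.List.pyRange 0 (A.length : Int) 1) = true <;>
        simp [check_outer, hc, ih]
  unfold check_mapping
  rw [houter]
  unfold rngI
  exact forall₂_congr (fun e1 _ => check_inner_iff A B g e1 _)

-- == the sameColor list with the all-ones coloring is allPairs ==

theorem color_ones_eq (A : List (List Int)) : color_ones A = List.replicate A.length 1 := by
  simp [color_ones, PySem.List.pyRepeat_singleton]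

theorem pyGetD_replicate {m : Nat} {e : Int} (h0 : 0 ≤ e) (h1 : e < (m : Int)) :
    PySem.List.pyGetD (List.replicate m (1 : Int)) e 0 = 1 := by
  rw [PySem.List.pyGetD_eq_getElem _ _ h0 (by simpa using h1)]
  simp

theorem scInner_eq (cA cB : List Int) (e2 : Int) (acc : List (Int × Int)) (rem : List Int)
    (hall : ∀ e3 ∈ rem, PySem.List.pyGetD cA e2 0 = PySem.List.pyGetD cB e3 0) :
    scInner cA cB e2 acc rem = acc ++ rem.map (fun e3 => (e2, e3)) := by
  induction rem generalizing acc with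
  | nil => simp [scInner]
  | cons e3 rest ih =>
    rw [scInner, if_pos (hall e3 (List.mem_cons_self))]
    rw [ih _ (fun x hx => hall x (List.mem_cons_of_mem _ hx))]
    simp

theorem sc_eq (A B : List (List Int)) (hB : A.length ≤ B.length) :
    scOuter (color_ones A) (color_ones B) (A.length : Int) []
        (PySem.List.pyRange 0 (A.length : Int) 1) = allPairs A.length := by
  have houter : ∀ (es : List Int) (acc : List (Int × Int)),
      (∀ e2 ∈ es, ∀ e3 ∈ PySem.List.pyRange 0 (A.length : Int) 1,
        PySem.List.pyGetD (color_ones A) e2 0 = PySem.List.pyGetD (color_ones B) e3 0) →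
      scOuter (color_ones A) (color_ones B) (A.length : Int) acc es =
        acc ++ es.flatMap (fun e2 =>
          (PySem.List.pyRange 0 (A.length : Int) 1).map (fun e3 => (e2, e3))) := by
    intro es
    induction es with
    | nil => intro acc _; simp [scOuter]
    | cons e2 rest ih =>
      intro acc hall
      rw [scOuter, scInner_eq _ _ _ _ _ (hall e2 (List.mem_cons_self))]
      rw [ih _ (fun x hx => hall x (List.mem_cons_of_mem _ hx))]
      simp
  rw [houter _ _ ?_]
  · simp [allPairs, rngI]
  · intro e2 he2 e3 he3
    rw [PySem.List.mem_pyRange_one] at he2 he3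
    rw [color_ones_eq, color_ones_eq]
    rw [pyGetD_replicate he2.1 he2.2, pyGetD_replicate he3.1 (by
      have : ((A.length : Int)) ≤ (B.length : Int) := by exact_mod_cast hB
      omega)]

-- == A side: the backtracking search returns the first completion passing check ==

theorem pyGetD_neg1_mem {h : List Int} {e : Int}
    (hg : PySem.List.pyGetD h e (-2) = -1) : (-1 : Int) ∈ h := by
  by_cases hr : PySem.Raise.InRange h.length e
  · rw [← hg]; exact PySem.List.pyGetD_mem h _ hr
  · exfalso
    rw [PySem.List.pyGetD, (PySem.List.pyGet?_eq_none_iff h e).mpr hr] at hg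
    norm_num at hg

theorem isoLoopA_eq (A B : List (List Int)) (h : List Int) (hlen : h.length = A.length)
    (IH : ∀ h', h'.count (-1) < h.count (-1) → h'.length = A.length →
      isoTopA A B (allPairs A.length) h' = mkRes (firstA A B (compls A.length h'))) :
    ∀ rem : List (Int × Int),
      (∀ p ∈ rem, 0 ≤ p.1 ∧ p.1 < (A.length : Int) ∧ 0 ≤ p.2 ∧ p.2 < (A.length : Int)) →
      isoLoopA A B (allPairs A.length) h rem =
        mkRes (firstA A B (rem.flatMap (fun p =>
          if PySem.List.pyGetD h p.1 (-2) = -1 ∧ p.2 ∉ h then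
            compls A.length (PySem.List.pySetD h p.1 p.2)
          else []))) := by
  intro rem
  induction rem with
  | nil =>
    intro _
    rw [isoLoopA]
    simp [firstA, mkRes]
  | cons pr rest ihr =>
    intro hb
    obtain ⟨e, f⟩ := pr
    have hbe := hb (e, f) List.mem_cons_self
    have hrest : ∀ p ∈ rest, 0 ≤ p.1 ∧ p.1 < (A.length : Int) ∧ 0 ≤ p.2 ∧ p.2 < (A.length : Int) :=
      fun p hp => hb p (List.mem_cons_of_mem _ hp)
    rw [isoLoopA, List.flatMap_cons]
    by_cases hc : PySem.List.pyGetD h e (-2) = -1 ∧ ¬ f ∈ h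
    · rw [dif_pos hc]
      have hset : PySem.List.pySetD h e f = h.set e.toNat f :=
        PySem.List.pySetD_of_nonneg h f hbe.1
      have hcnt := pvSetD_count_lt h e f hc.1 hc.2
      have hIH := IH (PySem.List.pySetD h e f) hcnt (by rw [hset]; simp [hlen])
      rw [hIH, if_pos (show PySem.List.pyGetD h e (-2) = -1 ∧ f ∉ h from ⟨hc.1, hc.2⟩)]
      cases hfa : firstA A B (compls A.length (PySem.List.pySetD h e f)) with
      | some g =>
        unfold firstA at hfa ⊢
        rw [List.find?_append, hfa, Option.some_or]
        simp [mkRes]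
      | none =>
        simp only [mkRes]
        rw [ihr hrest]
        unfold firstA at hfa ⊢
        rw [List.find?_append, hfa, Option.none_or]
        rfl
    · rw [dif_neg hc, if_neg hc, ihr hrest]
      simp

theorem isoTopA_eq (A B : List (List Int)) : ∀ (c : Nat) (h : List Int),
    h.count (-1) = c → h.length = A.length →
    isoTopA A B (allPairs A.length) h = mkRes (firstA A B (compls A.length h)) := by
  intro c
  induction c using Nat.strong_induction_on with
  | _ c IHc =>
  intro h hc hlen
  have hloop := isoLoopA_eq A B h hlen
    (fun h' hlt hlen' => IHc (h'.count (-1)) (by omega) h' rfl hlen')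
  have hbounds : ∀ p ∈ allPairs A.length,
      0 ≤ p.1 ∧ p.1 < (A.length : Int) ∧ 0 ≤ p.2 ∧ p.2 < (A.length : Int) := by
    intro p hp
    unfold allPairs at hp
    rw [List.mem_flatMap] at hp
    obtain ⟨e, he, hp⟩ := hp
    rw [List.mem_map] at hp
    obtain ⟨f, hf, rfl⟩ := hp
    obtain ⟨h1, h2⟩ := mem_rngI.mp he
    obtain ⟨h3, h4⟩ := mem_rngI.mp hf
    exact ⟨h1, h2, h3, h4⟩
  rw [isoTopA]
  by_cases hmem : (-1 : Int) ∈ h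
  · rw [if_neg (not_not_intro hmem), hloop _ hbounds]
    obtain ⟨k, hi⟩ : ∃ k, PySem.List.index? h (-1) = some k :=
      Option.isSome_iff_exists.mp ((PySem.List.index?_isSome_iff h (-1)).mpr hmem)
    obtain ⟨hk, hkv, hbef⟩ := PySem.List.getElem_of_index?_eq_some hi
    refine congrArg mkRes ?_
    have hassoc : (allPairs A.length).flatMap (fun p =>
          if PySem.List.pyGetD h p.1 (-2) = -1 ∧ p.2 ∉ h then
            compls A.length (PySem.List.pySetD h p.1 p.2) else [])
        = (rngI A.length).flatMap (fun e => (rngI A.length).flatMap (fun f =>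
            if PySem.List.pyGetD h e (-2) = -1 ∧ f ∉ h then
              compls A.length (PySem.List.pySetD h e f) else [])) := by
      unfold allPairs
      rw [List.flatMap_assoc]
      exact List.flatMap_congr (fun e _ => by rw [List.flatMap_map])
    rw [hassoc]
    set G : Int → List (List Int) := fun e => (rngI A.length).flatMap (fun f =>
      if PySem.List.pyGetD h e (-2) = -1 ∧ f ∉ h then
        compls A.length (PySem.List.pySetD h e f) else []) with hG
    have hkn : (k : Int) < (A.length : Int) := by exact_mod_cast (by omega : k < A.length)
    have hsplit : rngI A.length =
        PySem.List.pyRange 0 (k : Int) 1 ++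
          ((k : Int) :: PySem.List.pyRange ((k : Int) + 1) (A.length : Int) 1) := by
      unfold rngI
      rw [PySem.List.pyRange_one_append 0 (k : Int) (A.length : Int) (by omega) (by omega),
        PySem.List.pyRange_one_cons hkn]
    rw [hsplit, List.flatMap_append, List.flatMap_cons]
    have hpart1 : (PySem.List.pyRange 0 (k : Int) 1).flatMap G = [] := by
      rw [List.flatMap_eq_nil_iff]
      intro e he
      simp only [hG]
      rw [List.flatMap_eq_nil_iff]
      intro f _
      rw [PySem.List.mem_pyRange_one] at he
      rw [if_neg]
      rintro ⟨hgd, -⟩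
      rw [PySem.List.pyGetD_eq_getElem _ _ he.1 (by omega)] at hgd
      exact hbef e.toNat (by omega) hgd
    have hkblock : G ((k : Int)) = compls A.length h := by
      simp only [hG]
      have hgd : PySem.List.pyGetD h ((k : Int)) (-2) = -1 := by
        rw [PySem.List.pyGetD_eq_getElem _ _ (by omega) (by exact_mod_cast hk)]
        simpa using hkv
      have hstep : ∀ f ∈ rngI A.length,
          (if PySem.List.pyGetD h ((k : Int)) (-2) = -1 ∧ f ∉ h then
            compls A.length (PySem.List.pySetD h ((k : Int)) f) else [])
          = if f ∉ h then compls A.length (h.set k f) else [] := by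
        intro f _
        by_cases hfh : f ∈ h
        · rw [if_neg (by rintro ⟨-, hq⟩; exact hq hfh), if_neg (by simpa using hfh)]
        · rw [if_pos ⟨hgd, hfh⟩, if_pos hfh, PySem.List.pySetD_of_nonneg h f (by omega)]
          simp
      rw [List.flatMap_congr hstep, flatMap_if_filter, ← compls_some hi]
    rw [hpart1, hkblock, List.nil_append]
    unfold firstA
    rw [List.find?_append]
    cases hfa : List.find? (fun g => check_mapping A B g) (compls A.length h) with
    | some g => rw [Option.some_or]
    | none =>
      rw [Option.none_or]
      rw [List.find?_eq_none]
      intro g hg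
      rw [List.mem_flatMap] at hg
      obtain ⟨e, he, hge⟩ := hg
      simp only [hG] at hge
      rw [List.mem_flatMap] at hge
      obtain ⟨f, hf, hg⟩ := hge
      rw [PySem.List.mem_pyRange_one] at he
      by_cases hcond : PySem.List.pyGetD h e (-2) = -1 ∧ f ∉ h
      · rw [if_pos hcond] at hg
        have he0 : (0 : Int) ≤ e := by omega
        have helen : e.toNat < h.length := by omega
        have hev : h[e.toNat] = -1 := by
          have := hcond.1
          rwa [PySem.List.pyGetD_eq_getElem _ _ he0 (by omega)] at this
        rw [PySem.List.pySetD_of_nonneg h f he0] at hg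
        have hsub := compls_sub (h.count (-1)) h rfl helen hev hf hcond.2 hg
        simpa using List.find?_eq_none.mp hfa g hsub
      · rw [if_neg hcond] at hg
        cases hg
  · rw [if_pos hmem]
    have hi : PySem.List.index? h (-1) = none :=
      (PySem.List.index?_eq_none_iff h (-1)).mpr hmem
    rw [compls_none hi]
    by_cases hchk : check_mapping A B h = true
    · rw [if_pos hchk]
      simp [firstA, mkRes, hchk]
    · rw [if_neg hchk, hloop _ hbounds]
      have hnil : (allPairs A.length).flatMap (fun p =>
          if PySem.List.pyGetD h p.1 (-2) = -1 ∧ p.2 ∉ h then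
            compls A.length (PySem.List.pySetD h p.1 p.2) else []) = [] := by
        rw [List.flatMap_eq_nil_iff]
        intro p _
        rw [if_neg]
        rintro ⟨hgd, -⟩
        exact hmem (pyGetD_neg1_mem hgd)
      rw [hnil]
      simp [firstA, mkRes, hchk]

-- == B side: helpers about hOf and the incremental checks ==

theorem hOf_length {n : Nat} {p : List Int} (h : p.length ≤ n) : (hOf n p).length = n := by
  simp [hOf]; omega

theorem hOf_getElem {n : Nat} {p : List Int} {i : Nat} (hi : i < p.length)
    (hh : i < (hOf n p).length) : (hOf n p)[i] = p[i] := by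
  simp [hOf]; rw [List.getElem_append_left hi]

theorem index?_hOf {n : Nat} {p : List Int} (hlt : p.length < n)
    (hent : ∀ x ∈ p, (0 : Int) ≤ x) :
    PySem.List.index? (hOf n p) (-1) = some p.length := by
  have hlen : (hOf n p).length = n := hOf_length (by omega)
  apply index?_eq_some_of (k := p.length) (by omega)
  · show (hOf n p)[p.length]'_ = -1
    unfold hOf
    rw [List.getElem_append_right (le_refl _)]
    simp
  · intro j hj
    rw [hOf_getElem hj]
    have := hent (p[j]) (List.getElem_mem hj)
    omega

theorem hOf_set {n : Nat} {p : List Int} {f : Int} (hlt : p.length < n) :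
    (hOf n p).set p.length f = hOf n (p ++ [f]) := by
  obtain ⟨c, hcv⟩ : ∃ c, n - p.length = c + 1 := ⟨n - p.length - 1, by omega⟩
  unfold hOf
  rw [hcv, List.replicate_succ]
  rw [List.set_append_right _ _ (le_refl _)]
  simp
  omega

theorem mem_hOf {n : Nat} {p : List Int} {x : Int} (hx : (0:Int) ≤ x) :
    x ∈ hOf n p ↔ x ∈ p := by
  unfold hOf
  rw [List.mem_append, List.mem_replicate]
  constructor
  · rintro (h | ⟨-, rfl⟩)
    · exact h
    · norm_num at hx
  · exact Or.inl

theorem okLoopB_false_iff (A B : List (List Int)) (h : List Int) (k j : Int) (is : List Int) :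
    okLoopB A B h k j is = false ↔
      ∀ i ∈ is, pvGet2 A i k = pvGet2 B (pvHv h i) j ∧ pvGet2 A k i = pvGet2 B j (pvHv h i) := by
  induction is with
  | nil => simp [okLoopB]
  | cons i rest ih =>
    rw [okLoopB]
    by_cases hc : pvGet2 A i k ≠ pvGet2 B (pvHv h i) j ∨ pvGet2 A k i ≠ pvGet2 B j (pvHv h i)
    · rw [if_pos hc]
      constructor
      · intro habs; exact absurd habs (by simp)
      · intro hall
        exfalso
        obtain ⟨h1, h2⟩ := hall i List.mem_cons_self
        rcases hc with hc | hc
        · exact hc h1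
        · exact hc h2
    · rw [if_neg hc]
      rw [not_or, ne_eq, not_not, ne_eq, not_not] at hc
      rw [ih]
      constructor
      · intro hall i1 hi1
        rcases List.mem_cons.mp hi1 with rfl | hi1
        · exact hc
        · exact hall i1 hi1
      · intro hall i1 hi1
        exact hall i1 (List.mem_cons_of_mem _ hi1)

theorem consist_snoc (A B : List (List Int)) (p : List Int) (j : Int)
    (hd : pvGet2 A (p.length : Int) (p.length : Int) = pvGet2 B j j)
    (hij : ∀ i (hi : i < p.length),
      pvGet2 A (i : Int) (p.length : Int) = pvGet2 B (p[i]) j ∧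
      pvGet2 A (p.length : Int) (i : Int) = pvGet2 B j (p[i]))
    (hc : ConsistB A B p) : ConsistB A B (p ++ [j]) := by
  intro k hk
  by_cases hkp : k < p.length
  · obtain ⟨hdg, hin⟩ := hc k hkp
    refine ⟨by simpa [List.getElem_append, hkp] using hdg, ?_⟩
    intro i hi
    obtain ⟨h1, h2⟩ := hin i hi
    exact ⟨by simpa [List.getElem_append, hkp, (by omega : i < p.length)] using h1,
      by simpa [List.getElem_append, hkp, (by omega : i < p.length)] using h2⟩
  · have hkeq : k = p.length := by
      have := hk
      simp at this
      omega
    subst hkeq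
    refine ⟨by simpa [List.getElem_append] using hd, ?_⟩
    intro i hi
    obtain ⟨h1, h2⟩ := hij i hi
    exact ⟨by simpa [List.getElem_append, hi] using h1,
      by simpa [List.getElem_append, hi] using h2⟩

theorem consist_check (A B : List (List Int)) (p : List Int) (hlen : p.length = A.length)
    (_hent : ∀ x ∈ p, (0:Int) ≤ x) (hc : ConsistB A B p) :
    check_mapping A B p = true := by
  rw [check_iff]
  intro e1 he1 i1 hi1
  obtain ⟨he10, he1n⟩ := mem_rngI.mp he1
  obtain ⟨hi10, hi1n⟩ := mem_rngI.mp hi1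
  have ha : e1.toNat < p.length := by omega
  have hb : i1.toNat < p.length := by omega
  have hva : pvHv p e1 = p[e1.toNat] := by
    rw [pvHv, PySem.List.pyGetD_eq_getElem _ _ he10 (by omega)]
  have hvb : pvHv p i1 = p[i1.toNat] := by
    rw [pvHv, PySem.List.pyGetD_eq_getElem _ _ hi10 (by omega)]
  rw [hva, hvb]
  obtain ⟨a, rfl⟩ : ∃ a : Nat, e1 = (a : Int) := ⟨e1.toNat, (Int.toNat_of_nonneg he10).symm⟩
  obtain ⟨b, rfl⟩ : ∃ b : Nat, i1 = (b : Int) := ⟨i1.toNat, (Int.toNat_of_nonneg hi10).symm⟩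
  simp only [Int.toNat_natCast] at ha hb ⊢
  rcases Nat.lt_trichotomy a b with hlt | heq | hgt
  · exact ((hc b hb).2 a hlt).1
  · subst heq
    exact (hc a hb).1
  · exact ((hc a ha).2 b hgt).2

theorem block_fail (A B : List (List Int)) (p : List Int) (j : Int)
    (hlt : p.length < A.length) (hj0 : 0 ≤ j) (hent : ∀ x ∈ p, (0:Int) ≤ x)
    (hbad : pvGet2 A (p.length : Int) (p.length : Int) ≠ pvGet2 B j j ∨
      ∃ i, ∃ hi : i < p.length,
        pvGet2 A (i : Int) (p.length : Int) ≠ pvGet2 B (p[i]) j ∨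
        pvGet2 A (p.length : Int) (i : Int) ≠ pvGet2 B j (p[i])) :
    ∀ g ∈ compls A.length (hOf A.length (p ++ [j])), ¬ check_mapping A B g = true := by
  intro g hg hchk
  have hple : (p ++ [j]).length ≤ A.length := by simp; omega
  have hhlen : (hOf A.length (p ++ [j])).length = A.length := hOf_length hple
  obtain ⟨hglen, hgext⟩ := compls_ext _ (hOf A.length (p ++ [j])) g rfl hg
  have hglen' : g.length = A.length := by rw [hglen, hhlen]
  -- g agrees with p ++ [j] on the first p.length + 1 positions
  have hval : ∀ i (hi : i < (p ++ [j]).length), g[i]'(by simp at hi; omega) = (p ++ [j])[i] := by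
    intro i hi
    have hi' : i < (hOf A.length (p ++ [j])).length := by omega
    have hv0 : (hOf A.length (p ++ [j]))[i] = (p ++ [j])[i] := hOf_getElem hi hi'
    have hvpos : (0:Int) ≤ (p ++ [j])[i] := by
      rcases List.mem_append.mp (List.getElem_mem hi) with hm | hm
      · exact hent _ hm
      · simp at hm; omega
    have := hgext i (by omega) (by simp at hi; omega) (by rw [hv0]; omega)
    rw [this, hv0]
  rw [check_iff] at hchk
  have key : ∀ a (ha : a < (p ++ [j]).length) (b : Nat) (hb : b < (p ++ [j]).length),
      pvGet2 A (a : Int) (b : Int) = pvGet2 B ((p ++ [j])[a]) ((p ++ [j])[b]) := by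
    intro a ha b hb
    have hplen : (p ++ [j]).length = p.length + 1 := by simp
    have h1 := hchk (a : Int) (mem_rngI.mpr ⟨by omega, by exact_mod_cast (by omega : a < A.length)⟩)
      (b : Int) (mem_rngI.mpr ⟨by omega, by exact_mod_cast (by omega : b < A.length)⟩)
    have hva : pvHv g (a : Int) = (p ++ [j])[a] := by
      rw [pvHv, PySem.List.pyGetD_eq_getElem _ _ (by omega) (by rw [hglen']; exact_mod_cast (by omega : a < A.length))]
      simp only [Int.toNat_natCast]
      exact hval a ha
    have hvb : pvHv g (b : Int) = (p ++ [j])[b] := by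
      rw [pvHv, PySem.List.pyGetD_eq_getElem _ _ (by omega) (by rw [hglen']; exact_mod_cast (by omega : b < A.length))]
      simp only [Int.toNat_natCast]
      exact hval b hb
    rw [hva, hvb] at h1
    exact h1
  have hplen : (p ++ [j]).length = p.length + 1 := by simp
  rcases hbad with hbad | ⟨i, hi, hbad⟩
  · have := key p.length (by omega) p.length (by omega)
    rw [List.getElem_append_right (le_refl _)] at this
    simp at this
    exact hbad this
  · rcases hbad with hbad | hbad
    · have := key i (by omega) p.length (by omega)
      rw [List.getElem_append_left hi, List.getElem_append_right (le_refl _)] at this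
      simp at this
      exact hbad this
    · have := key p.length (by omega) i (by omega)
      rw [List.getElem_append_left hi, List.getElem_append_right (le_refl _)] at this
      simp at this
      exact hbad this

theorem extLoopB_eq (A B : List (List Int)) (hB : A.length ≤ B.length) (fuel : Nat)
    (p : List Int) (hlen : p.length + (fuel + 1) = A.length)
    (hent : ∀ x ∈ p, 0 ≤ x ∧ x < (A.length : Int)) (hcons : ConsistB A B p)
    (IH : ∀ j : Int, 0 ≤ j → j < (A.length : Int) → j ∉ p → ConsistB A B (p ++ [j]) →
      extTopB A B (color_ones A) (color_ones B) (A.length : Int) fuel (p ++ [j]) =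
        mkRes (firstA A B (compls A.length (hOf A.length (p ++ [j]))))) :
    ∀ js : List Int, (∀ j ∈ js, 0 ≤ j ∧ j < (A.length : Int)) →
      extLoopB A B (color_ones A) (color_ones B) (A.length : Int) fuel p js =
        mkRes (firstA A B (js.flatMap (fun j =>
          if j ∉ p then compls A.length (hOf A.length (p ++ [j])) else []))) := by
  intro js
  induction js with
  | nil =>
    intro _
    rw [extLoopB]
    simp [firstA, mkRes]
  | cons j js ihj =>
    intro hjs
    have hj := hjs j List.mem_cons_self
    have hjs' := fun x hx => hjs x (List.mem_cons_of_mem _ hx)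
    have hplt : p.length < A.length := by omega
    have hpI : ((p.length : Nat) : Int) < (A.length : Int) := by exact_mod_cast hplt
    have hcolA : PySem.List.pyGetD (color_ones A) ((p.length : Int)) 0 = 1 := by
      rw [color_ones_eq]
      exact pyGetD_replicate (by omega) hpI
    have hcolB : PySem.List.pyGetD (color_ones B) j 0 = 1 := by
      rw [color_ones_eq]
      refine pyGetD_replicate hj.1 ?_
      have hBl : ((A.length : Int)) ≤ (B.length : Int) := by exact_mod_cast hB
      omega
    have hent0 : ∀ x ∈ p, (0:Int) ≤ x := fun x hx => (hent x hx).1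
    rw [extLoopB, List.flatMap_cons]
    by_cases hjp : j ∈ p
    · rw [if_pos (Or.inl hjp), ihj hjs', if_neg (by simpa using hjp)]
      simp
    · rw [if_neg (fun hq => hq.elim hjp (fun h2 => h2 (hcolA.trans hcolB.symm)))]
      rw [if_pos (show ¬ j ∈ p from hjp)]
      by_cases hdg : pvGet2 A ((p.length : Int)) ((p.length : Int)) ≠ pvGet2 B j j
      · rw [if_pos hdg, ihj hjs']
        have hnone : List.find? (fun g => check_mapping A B g)
            (compls A.length (hOf A.length (p ++ [j]))) = none := by
          rw [List.find?_eq_none]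
          intro g hg
          simpa using block_fail A B p j hplt hj.1 hent0 (Or.inl hdg) g hg
        unfold firstA
        rw [List.find?_append, hnone, Option.none_or]
      · rw [if_neg hdg]
        rw [ne_eq, not_not] at hdg
        by_cases hok : okLoopB A B p ((p.length : Int)) j
            (PySem.List.pyRange 0 ((p.length : Int)) 1) = true
        · rw [if_pos hok]
          have hnall : ¬ (∀ i ∈ PySem.List.pyRange 0 ((p.length : Int)) 1,
              pvGet2 A i ((p.length : Int)) = pvGet2 B (pvHv p i) j ∧
              pvGet2 A ((p.length : Int)) i = pvGet2 B j (pvHv p i)) := by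
            intro hall
            rw [← okLoopB_false_iff] at hall
            rw [hall] at hok
            exact absurd hok (by simp)
          simp only [not_forall] at hnall
          obtain ⟨i, hi, hbadv⟩ := hnall
          rw [PySem.List.mem_pyRange_one] at hi
          obtain ⟨a, rfl⟩ : ∃ a : Nat, i = (a : Int) := ⟨i.toNat, (Int.toNat_of_nonneg hi.1).symm⟩
          have halt : a < p.length := by exact_mod_cast hi.2
          have hpv : pvHv p ((a : Int)) = p[a] := by
            rw [pvHv, PySem.List.pyGetD_eq_getElem _ _ (by omega) (by exact_mod_cast halt)]
            simp
          rw [hpv] at hbadv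
          have hbad2 : pvGet2 A ((a : Int)) ((p.length : Int)) ≠ pvGet2 B (p[a]) j ∨
              pvGet2 A ((p.length : Int)) ((a : Int)) ≠ pvGet2 B j (p[a]) := by tauto
          rw [ihj hjs']
          have hnone : List.find? (fun g => check_mapping A B g)
              (compls A.length (hOf A.length (p ++ [j]))) = none := by
            rw [List.find?_eq_none]
            intro g hg
            simpa using block_fail A B p j hplt hj.1 hent0 (Or.inr ⟨a, halt, hbad2⟩) g hg
          unfold firstA
          rw [List.find?_append, hnone, Option.none_or]
        · rw [if_neg hok]
          have hokf : okLoopB A B p ((p.length : Int)) j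
              (PySem.List.pyRange 0 ((p.length : Int)) 1) = false := by
            revert hok
            cases okLoopB A B p ((p.length : Int)) j
              (PySem.List.pyRange 0 ((p.length : Int)) 1) <;> simp
          have hall := (okLoopB_false_iff A B p _ j _).mp hokf
          have hconj : ConsistB A B (p ++ [j]) := by
            refine consist_snoc A B p j hdg ?_ hcons
            intro i hi
            have hmem : ((i : Nat) : Int) ∈ PySem.List.pyRange 0 ((p.length : Int)) 1 := by
              rw [PySem.List.mem_pyRange_one]
              exact ⟨by omega, by exact_mod_cast hi⟩
            have hget := hall ((i : Int)) hmem
            have hpv : pvHv p ((i : Int)) = p[i] := by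
              rw [pvHv, PySem.List.pyGetD_eq_getElem _ _ (by omega) (by exact_mod_cast hi)]
              simp
            rwa [hpv] at hget
          have hIH := IH j hj.1 hj.2 hjp hconj
          rw [hIH]
          cases hfa : firstA A B (compls A.length (hOf A.length (p ++ [j]))) with
          | some g =>
            unfold firstA at hfa ⊢
            rw [List.find?_append, hfa, Option.some_or]
            simp [mkRes]
          | none =>
            simp only [mkRes]
            rw [ihj hjs']
            unfold firstA at hfa ⊢
            rw [List.find?_append, hfa, Option.none_or]
            rfl

theorem extTopB_eq (A B : List (List Int)) (hB : A.length ≤ B.length) :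
    ∀ (fuel : Nat) (p : List Int), p.length + fuel = A.length →
      (∀ x ∈ p, 0 ≤ x ∧ x < (A.length : Int)) → ConsistB A B p →
      extTopB A B (color_ones A) (color_ones B) (A.length : Int) fuel p =
        mkRes (firstA A B (compls A.length (hOf A.length p))) := by
  intro fuel
  induction fuel with
  | zero =>
    intro p hlen hent hcons
    rw [extTopB]
    have hfull : p.length = A.length := by omega
    have hOfp : hOf A.length p = p := by
      unfold hOf
      rw [hfull]
      simp
    have hi : PySem.List.index? p (-1) = none := by
      rw [PySem.List.index?_eq_none_iff]
      intro hm
      have := (hent _ hm).1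
      norm_num at this
    rw [hOfp, compls_none hi]
    have hchk := consist_check A B p hfull (fun x hx => (hent x hx).1) hcons
    simp [firstA, mkRes, hchk]
  | succ fuel ihf =>
    intro p hlen hent hcons
    rw [extTopB]
    rw [extLoopB_eq A B hB fuel p hlen hent hcons ?ihh _ ?bnds]
    case ihh =>
      intro j hj0 hjn hjp hconsj
      refine ihf (p ++ [j]) (by simp; omega) ?_ hconsj
      intro x hx
      rcases List.mem_append.mp hx with hx | hx
      · exact hent x hx
      · simp at hx
        subst hx
        exact ⟨hj0, hjn⟩
    case bnds =>
      intro j hjm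
      rw [PySem.List.mem_pyRange_one] at hjm
      exact hjm
    refine congrArg (fun l => mkRes (firstA A B l)) ?_
    have hplt : p.length < A.length := by omega
    rw [flatMap_if_filter]
    rw [compls_some (index?_hOf hplt (fun x hx => (hent x hx).1))]
    have hfeq : (PySem.List.pyRange 0 ((A.length : Nat) : Int) 1).filter (fun x => decide (x ∉ p)) =
        (rngI A.length).filter (fun f => decide (f ∉ hOf A.length p)) := by
      apply List.filter_congr
      intro x hx
      have hx0 := (mem_rngI.mp hx).1
      simp [mem_hOf hx0]
    rw [hfeq]
    apply List.flatMap_congr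
    intro f hf
    rw [← hOf_set hplt]


-- ===== VERDICT (by name: the statement is the Claim_ definition above) =====
theorem are_iso_with_colors_spec : Claim_equal_are_iso_with_colors := by
  intro A B _hdom hpre
  unfold Spec_are_iso_with_colors
  obtain ⟨hB, -, -⟩ := hpre
  have h0 : PySem.List.pyRepeat [(-1 : Int)] (A.length : Int) = hOf A.length [] := by
    simp [PySem.List.pyRepeat_singleton, hOf]
  have ha : are_iso_with_colors A B =
      mkRes (firstA A B (compls A.length (hOf A.length []))) := by
    show isoTopA A B
        (scOuter (color_ones A) (color_ones B) (A.length : Int) []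
          (PySem.List.pyRange 0 (A.length : Int) 1))
        (PySem.List.pyRepeat [(-1 : Int)] (A.length : Int)) = _
    rw [sc_eq A B hB, h0]
    exact isoTopA_eq A B _ _ rfl (by simp [hOf])
  have hb : are_iso_with_colors_alt A B =
      mkRes (firstA A B (compls A.length (hOf A.length []))) := by
    show (match extTopB A B (color_ones A) (color_ones B) (A.length : Int) A.length [] with
      | (true, g) => (true, g)
      | (false, _) => ((false : Bool), ([] : List Int))) = _
    rw [extTopB_eq A B hB A.length [] (by simp) (by simp) (by intro k hk; simp at hk)]
    cases hfa : firstA A B (compls A.length (hOf A.length [])) <;> simp [mkRes]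
  rw [ha, hb]
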